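-- pv_equiv track=rewrite | github.com/pirate/experiments | merkel_trees.py | reverse_flat_index
-- ===== SOURCE A (Python) =====
-- from collections import defaultdict
--
-- def reverse_flat_index(index: dict) -> dict:
--     """reverse a map of {key: hash} into {hash: [keys]}"""
--     reverse_index = defaultdict(set)
--     for key, val in index.items():
--         reverse_index[val].add(key)
--
--     return {
--         key: sorted(list(val))
--         for key, val in reverse_index.items()
--     }
-- ===== SOURCE B (Python) =====
-- def reverse_flat_index(index: dict) -> dict:
--     """reverse a map of {key: hash} into {hash: [keys]}"""
--     return {
--         h: sorted(k for k, v in index.items() if v == h)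
--         for h in dict.fromkeys(index.values())
--     }
-- ===== Notes on version B (the rewrite author's own statement) =====
-- stated objective: simpler
-- what changed: B builds no intermediate grouping structure: a single dict comprehension over the distinct hashes (in first-appearance order) collects each bucket by filtering the items for that hash, replacing A's mutable defaultdict-of-sets grouping pass plus per-bucket set-to-sorted-list conversion.
import Mathlib
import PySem

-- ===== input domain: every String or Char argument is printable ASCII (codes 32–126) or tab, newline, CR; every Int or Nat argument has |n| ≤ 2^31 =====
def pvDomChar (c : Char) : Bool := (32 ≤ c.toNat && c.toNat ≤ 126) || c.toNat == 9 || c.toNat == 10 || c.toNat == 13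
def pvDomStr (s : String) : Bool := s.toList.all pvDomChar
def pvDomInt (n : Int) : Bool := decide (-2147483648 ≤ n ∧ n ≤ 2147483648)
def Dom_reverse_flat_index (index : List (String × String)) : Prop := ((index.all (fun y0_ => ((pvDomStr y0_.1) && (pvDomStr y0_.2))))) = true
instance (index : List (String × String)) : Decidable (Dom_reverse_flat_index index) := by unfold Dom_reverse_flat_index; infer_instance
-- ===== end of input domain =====

-- B replaces A's mutable defaultdict-of-sets grouping pass by a single comprehension
-- over the distinct hashes, filtering the items per hash (objective: simpler).

-- ===== PORT A =====
def reverse_flat_index (index : List (String × String)) : List (String × List String) :=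
  let d := PySem.Dict.ofList index          -- the parameter is a Python dict
  let rev : PySem.Dict String (PySem.Set String) :=
    d.items.foldl (fun r p => r.modify p.2 PySem.Set.empty (fun s => PySem.Set.add s p.1))
      PySem.Dict.empty                      -- defaultdict(set); reverse_index[val].add(key)
  (rev.items.map (fun p => (p.1, PySem.List.sorted p.2 (fun x => x))))

-- ===== PORT B =====
def reverse_flat_index_alt (index : List (String × String)) : List (String × List String) :=
  let d := PySem.Dict.ofList index
  -- {h: sorted(k for k, v in index.items() if v == h) for h in dict.fromkeys(index.values())}
  (PySem.List.dedup d.values).map (fun h =>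
    (h, PySem.List.sorted ((d.items.filter (fun p => p.2 == h)).map Prod.fst) (fun x => x)))

-- ===== PRECONDITION & SPEC =====
def Spec_reverse_flat_index (index : List (String × String)) (out : List (String × List String)) : Prop := out = reverse_flat_index_alt index
instance (index : List (String × String)) (out : List (String × List String)) : Decidable (Spec_reverse_flat_index index out) := by unfold Spec_reverse_flat_index; infer_instance

-- ===== CLAIM (what is proved, stated in full; the proofs are below) =====
def Claim_equal_reverse_flat_index : Prop := ∀ (index : List (String × String)), Dom_reverse_flat_index index → Spec_reverse_flat_index index (reverse_flat_index index)

-- ===== LEMMAS AND PROOFS =====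

-- A's grouping loop: each bucket is the fst-projection of the matching pairs, provided
-- the keys being added are distinct and absent from the accumulator's buckets
lemma pv_groupA_getD (ps : List (String × String)) (d : PySem.Dict String (PySem.Set String))
    (c : String) (h1 : (ps.map Prod.fst).Nodup)
    (h2 : ∀ p ∈ ps, ∀ v, p.1 ∉ d.getD v PySem.Set.empty) :
    (ps.foldl (fun r p => r.modify p.2 PySem.Set.empty (fun s => PySem.Set.add s p.1)) d).getD c PySem.Set.empty
      = d.getD c PySem.Set.empty ++ (ps.filter (fun p => p.2 == c)).map Prod.fst := by
  induction ps generalizing d with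
  | nil => simp
  | cons p ps ih =>
    simp only [List.foldl_cons]
    have hnotin : p.1 ∉ d.getD p.2 PySem.Set.empty := h2 p (by simp) p.2
    have hadd : PySem.Set.add (d.getD p.2 PySem.Set.empty) p.1
        = d.getD p.2 PySem.Set.empty ++ [p.1] := by
      simp only [PySem.Set.add, PySem.Set.contains]
      rw [if_neg]
      simp only [List.contains_eq_mem, decide_eq_true_eq]
      exact hnotin
    have hgd : ∀ v, (d.modify p.2 PySem.Set.empty (fun s => PySem.Set.add s p.1)).getD v PySem.Set.empty
        = if v = p.2 then d.getD p.2 PySem.Set.empty ++ [p.1] else d.getD v PySem.Set.empty := by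
      intro v; rw [PySem.Dict.getD_modify, hadd]
    have h1' : (ps.map Prod.fst).Nodup := (List.nodup_cons.mp h1).2
    have hpf : p.1 ∉ ps.map Prod.fst := (List.nodup_cons.mp h1).1
    rw [ih _ h1' ?_]
    · rw [hgd c]
      by_cases hc : p.2 = c
      · simp [hc]
      · have hb : (p.2 == c) = false := by simp [hc]
        rw [if_neg (fun h => hc h.symm)]
        simp [hb]
    · intro q hq v
      rw [hgd v]
      by_cases hv : v = p.2
      · rw [if_pos hv]
        simp only [List.mem_append, List.mem_singleton]
        push Not
        refine ⟨h2 q (by simp [hq]) p.2, ?_⟩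
        intro heq; exact hpf (heq ▸ List.mem_map_of_mem hq)
      · rw [if_neg hv]; exact h2 q (by simp [hq]) v

lemma pv_main (index : List (String × String)) :
    reverse_flat_index index = reverse_flat_index_alt index := by
  unfold reverse_flat_index reverse_flat_index_alt
  set d := PySem.Dict.ofList index with hd
  set ps := d.items with hps
  have hnd : d.keys.Nodup := PySem.Dict.nodup_keys_ofList index
  have hndf : (ps.map Prod.fst).Nodup := hnd
  set vals := ps.map Prod.snd with hvals
  set order := PySem.Set.ofList vals with horder
  have hdedup : PySem.List.dedup d.values = order := rfl
  have hordernd : order.Nodup := PySem.Set.nodup_ofList vals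
  set rev := ps.foldl (fun r p => r.modify p.2 PySem.Set.empty (fun s => PySem.Set.add s p.1))
      (PySem.Dict.empty : PySem.Dict String (PySem.Set String)) with hrev
  have hrevkeys : rev.keys = order := by
    rw [hrev]
    rw [PySem.Dict.keys_foldl_modify_key ps Prod.snd PySem.Set.empty
      (fun _ p => fun s => PySem.Set.add s p.1) PySem.Dict.empty]
    rw [horder, PySem.Set.ofList_eq_foldl]
    rfl
  have hrevnd : rev.keys.Nodup := by rw [hrevkeys]; exact hordernd
  have hrevgetD : ∀ c, rev.getD c PySem.Set.empty
      = (ps.filter (fun p => p.2 == c)).map Prod.fst := by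
    intro c
    rw [hrev, pv_groupA_getD ps PySem.Dict.empty c hndf (by simp [PySem.Dict.getD_empty, PySem.Set.empty])]
    simp [PySem.Dict.getD_empty, PySem.Set.empty]
  have hA : rev.items.map (fun p => (p.1, PySem.List.sorted p.2 (fun x => x)))
      = order.map (fun h => (h, PySem.List.sorted ((ps.filter (fun p => p.2 == h)).map Prod.fst) (fun x => x))) := by
    rw [PySem.Dict.items_eq_map_keys rev hrevnd PySem.Set.empty, hrevkeys, List.map_map]
    refine List.map_congr_left ?_
    intro h _
    simp only [Function.comp_def]
    exact congrArg (fun l => (h, PySem.List.sorted l (fun x => x))) (hrevgetD h)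
  simp only []
  rw [hdedup, hA]

-- ===== VERDICT (by name: the statement is the Claim_ definition above) =====
theorem reverse_flat_index_spec : Claim_equal_reverse_flat_index := by
  intro index _
  exact pv_main index
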